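-- pv_equiv track=rewrite | github.com/Paulpanther/info-flow | rumor_centrality/rumor_detection.py | get_bfs_tree
-- ===== SOURCE A (Python) =====
-- from typing import Dict, List, Tuple
-- from collections import deque
--
-- def get_bfs_tree(adj_list, root) -> Dict[int, List[int]]:
--     """Build a bfs tree from root"""
--     queue = deque([root])
--     visited = {root: True}
--     T = {}
--
--     while len(queue) > 0:
--         v = queue.pop()
--         children = adj_list[v]
--         T[v] = []
--
--         for child in children:
--             if not visited.get(child, False):
--                 T[v].append(child)
--                 queue.appendleft(child)
--                 visited[child] = True
--     return T
-- ===== SOURCE B (Python) =====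
-- def _fresh_children(children, visited):
--     """Children not yet visited, in adjacency order; marks them visited."""
--     kids = []
--     for c in children:
--         if not visited.get(c, False):
--             visited[c] = True
--             kids.append(c)
--     return kids
--
--
-- def get_bfs_tree(adj_list, root):
--     """Build a bfs tree from root (level-synchronous BFS: expand one whole
--     frontier per round instead of popping a deque vertex by vertex)."""
--     T = {}
--     visited = {root: True}
--     frontier = [root]
--     while frontier:
--         nxt = []
--         for v in frontier:
--             kids = _fresh_children(adj_list[v], visited)
--             T[v] = kids
--             nxt += kids
--         frontier = nxt
--     return T
-- ===== Notes on version B (the rewrite author's own statement) =====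
-- stated objective: alternative
-- what changed: A pops one vertex at a time from a FIFO deque, interleaving tree-append/enqueue/mark per child; B is a level-synchronous BFS that expands a whole frontier per round, computing each vertex's fresh-children list in one helper pass and concatenating frontiers.
import Mathlib
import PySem

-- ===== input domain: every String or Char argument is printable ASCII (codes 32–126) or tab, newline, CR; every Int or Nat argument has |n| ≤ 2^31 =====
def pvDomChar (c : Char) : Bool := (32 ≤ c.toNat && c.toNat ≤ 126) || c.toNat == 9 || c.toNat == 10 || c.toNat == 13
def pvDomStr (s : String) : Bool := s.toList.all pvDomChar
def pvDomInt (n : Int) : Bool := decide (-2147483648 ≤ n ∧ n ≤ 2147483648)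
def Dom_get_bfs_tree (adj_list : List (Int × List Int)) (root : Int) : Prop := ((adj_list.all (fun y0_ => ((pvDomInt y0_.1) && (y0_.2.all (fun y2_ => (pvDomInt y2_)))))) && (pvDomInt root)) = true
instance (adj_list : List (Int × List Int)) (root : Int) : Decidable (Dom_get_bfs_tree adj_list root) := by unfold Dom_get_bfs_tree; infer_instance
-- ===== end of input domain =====

-- B replaces A's vertex-at-a-time deque BFS by a level-synchronous BFS (expand a whole
-- frontier per round, computing each vertex's fresh-children list in one helper pass);
-- objective: alternative decomposition, same exact tree.

-- ===== PORT A =====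
-- A's deque: pop() takes the RIGHT end, appendleft adds at the LEFT; we store the queue
-- reversed, so the list head is the next vertex popped and appendleft appends at the end.
-- The Nat fuel (1 + total number of child occurrences) is an artifact making the loop
-- total; it bounds the number of pops, since every vertex is enqueued at most once.
-- When adj_list[v] is missing Python raises KeyError; the port returns the current tree
-- there (excluded by Pre_get_bfs_tree).
def bfsLoopA (adj : PySem.Dict Int (List Int)) :
    Nat → List Int → PySem.Dict Int Bool → PySem.Dict Int (List Int) →
    PySem.Dict Int (List Int)
  | 0, _, _, T => T
  | _+1, [], _, T => T
  | n+1, v :: q, vis, T =>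
    match adj.get? v with
    | none => T
    | some children =>
      let s := children.foldl
        (fun (st : PySem.Dict Int (List Int) × PySem.Dict Int Bool × List Int) c =>
          if st.2.1.getD c false then st
          else (st.1.modify v [] (· ++ [c]), st.2.1.insert c true, st.2.2 ++ [c]))
        (T.insert v [], vis, q)
      bfsLoopA adj n s.2.2 s.2.1 s.1

def get_bfs_tree (adj_list : List (Int × List Int)) (root : Int) : List (Int × List Int) :=
  (bfsLoopA ⟨adj_list⟩ (1 + (adj_list.map (fun p => p.2.length)).sum) [root]
    (PySem.Dict.empty.insert root true) PySem.Dict.empty).items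

-- ===== PORT B =====
-- _fresh_children: the not-yet-visited children in adjacency order, marking them visited.
def freshChildrenB (children : List Int) (vis : PySem.Dict Int Bool) :
    List Int × PySem.Dict Int Bool :=
  children.foldl
    (fun (st : List Int × PySem.Dict Int Bool) c =>
      if st.2.getD c false then st else (st.1 ++ [c], st.2.insert c true))
    ([], vis)

-- one round: expand every frontier vertex; none = a KeyError inside the round (off Pre_).
def levelB (adj : PySem.Dict Int (List Int)) (f : List Int)
    (vis : PySem.Dict Int Bool) (T : PySem.Dict Int (List Int)) :
    Option (PySem.Dict Int (List Int) × PySem.Dict Int Bool × List Int) :=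
  f.foldl
    (fun acc v =>
      match acc with
      | none => none
      | some (T, vis, nxt) =>
        match adj.get? v with
        | none => none
        | some cs =>
          let p := freshChildrenB cs vis
          some (T.insert v p.1, p.2, nxt ++ p.1))
    (some (T, vis, []))

-- the fuel (same artifact bound as in port A) decreases by the frontier size per round.
def bfsLoopB (adj : PySem.Dict Int (List Int)) :
    Nat → List Int → PySem.Dict Int Bool → PySem.Dict Int (List Int) →
    PySem.Dict Int (List Int)
  | _, [], _, T => T
  | 0, _ :: _, _, T => T
  | n+1, v :: f, vis, T =>
    match levelB adj (v :: f) vis T with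
    | none => T
    | some (T', vis', nxt) => bfsLoopB adj (n - f.length) nxt vis' T'

def get_bfs_tree_alt (adj_list : List (Int × List Int)) (root : Int) : List (Int × List Int) :=
  (bfsLoopB ⟨adj_list⟩ (1 + (adj_list.map (fun p => p.2.length)).sum) [root]
    (PySem.Dict.empty.insert root true) PySem.Dict.empty).items

-- ===== PRECONDITION & SPEC =====
-- child-expansion step of the reachable-vertex closure (a declarative saturation,
-- not either port's BFS: no queue, no tree, no visit order).
def pvStep (adj_list : List (Int × List Int)) (S : List Int) : List Int :=
  PySem.Set.update S (S.flatMap (fun v => (((PySem.Dict.mk adj_list).get? v).getD [])))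

-- vertices reachable from root through keyed vertices; iterating the step
-- |root :: all listed children| times always reaches the fixpoint.
def pvReach (adj_list : List (Int × List Int)) (root : Int) : List Int :=
  (pvStep adj_list)^[(root :: adj_list.flatMap (fun p => p.2)).length]
    (PySem.Set.ofList [root])

-- Pre_ holds exactly when every vertex reachable from root has an entry in adj_list —
-- precisely the inputs on which A's 'adj_list[v]' never raises KeyError.
def Pre_get_bfs_tree (adj_list : List (Int × List Int)) (root : Int) : Prop :=
  ∀ v ∈ pvReach adj_list root, ((PySem.Dict.mk adj_list).get? v).isSome = true
instance (adj_list : List (Int × List Int)) (root : Int) : Decidable (Pre_get_bfs_tree adj_list root) := by unfold Pre_get_bfs_tree; infer_instance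

def pvWitness_get_bfs_tree : (List (Int × List Int)) × Int := ([(0, [1, 2]), (1, [0, 2]), (2, [])], 0)

def Spec_get_bfs_tree (adj_list : List (Int × List Int)) (root : Int) (out : List (Int × List Int)) : Prop := out = get_bfs_tree_alt adj_list root
instance (adj_list : List (Int × List Int)) (root : Int) (out : List (Int × List Int)) : Decidable (Spec_get_bfs_tree adj_list root out) := by unfold Spec_get_bfs_tree; infer_instance

-- ===== CLAIM (what is proved, stated in full; the proofs are below) =====
def Claim_equal_get_bfs_tree : Prop := ∀ (adj_list : List (Int × List Int)) (root : Int), Dom_get_bfs_tree adj_list root → Pre_get_bfs_tree adj_list root → Spec_get_bfs_tree adj_list root (get_bfs_tree adj_list root)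

-- ===== LEMMAS AND PROOFS =====

-- unvisited child occurrences left in adj_list: the potential-enqueue budget.
def muA (adj_list : List (Int × List Int)) (vis : PySem.Dict Int Bool) : Nat :=
  (adj_list.map (fun p => p.2.countP (fun c => !(vis.getD c false)))).sum

theorem fc_acc (cs ks0 : List Int) (vis : PySem.Dict Int Bool) :
    cs.foldl
      (fun (st : List Int × PySem.Dict Int Bool) c =>
        if st.2.getD c false then st else (st.1 ++ [c], st.2.insert c true))
      (ks0, vis)
    = (ks0 ++ (freshChildrenB cs vis).1, (freshChildrenB cs vis).2) := by
  induction cs generalizing ks0 vis with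
  | nil => simp [freshChildrenB]
  | cons c t ih =>
    simp only [freshChildrenB, List.foldl_cons]
    by_cases h : vis.getD c false
    · simp [h, ih]
    · simp only [h, Bool.false_eq_true, if_false]
      rw [ih]
      rw [show ([] ++ [c], vis.insert c true) = (([c] : List Int), vis.insert c true) by simp]
      rw [ih [c]]
      simp

theorem fc_subset (cs : List Int) (vis : PySem.Dict Int Bool) :
    ∀ x ∈ (freshChildrenB cs vis).1, x ∈ cs := by
  induction cs generalizing vis with
  | nil => simp [freshChildrenB]
  | cons c t ih =>
    simp only [freshChildrenB, List.foldl_cons]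
    by_cases h : vis.getD c false
    · simp only [h, ite_true]
      intro x hx
      exact List.mem_cons_of_mem _ (ih vis x hx)
    · simp only [h, Bool.false_eq_true, ite_false]
      rw [fc_acc]
      intro x hx
      rcases List.mem_append.1 hx with h1 | h1
      · simp at h1; simp [h1]
      · exact List.mem_cons_of_mem _ (ih _ x h1)

theorem childA (cs : List Int) (v : Int) (vis : PySem.Dict Int Bool)
    (T : PySem.Dict Int (List Int)) (q ks0 : List Int) :
    cs.foldl
      (fun (st : PySem.Dict Int (List Int) × PySem.Dict Int Bool × List Int) c =>
        if st.2.1.getD c false then st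
        else (st.1.modify v [] (· ++ [c]), st.2.1.insert c true, st.2.2 ++ [c]))
      (T.insert v ks0, vis, q)
    = (T.insert v (ks0 ++ (freshChildrenB cs vis).1), (freshChildrenB cs vis).2,
       q ++ (freshChildrenB cs vis).1) := by
  induction cs generalizing vis q ks0 with
  | nil => simp [freshChildrenB]
  | cons c t ih =>
    simp only [List.foldl_cons]
    by_cases h : vis.getD c false
    · simp only [h, ite_true]
      have hfc : freshChildrenB (c :: t) vis = freshChildrenB t vis := by
        simp [freshChildrenB, h]
      rw [hfc, ih]
    · have hm : (T.insert v ks0).modify v [] (· ++ [c]) = T.insert v (ks0 ++ [c]) := by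
        rw [PySem.Dict.modify, PySem.Dict.getD_insert_self, PySem.Dict.insert_insert_self]
      have hfc : (freshChildrenB (c :: t) vis)
          = ([c] ++ (freshChildrenB t (vis.insert c true)).1,
             (freshChildrenB t (vis.insert c true)).2) := by
        simp only [freshChildrenB, List.foldl_cons, h, Bool.false_eq_true, if_false]
        rw [show (([] : List Int) ++ [c], vis.insert c true)
            = (([c] : List Int), vis.insert c true) by simp]
        exact fc_acc t [c] (vis.insert c true)
      simp only [h, Bool.false_eq_true, if_false, hm, hfc]
      rw [ih]
      simp

theorem level_none (adj : PySem.Dict Int (List Int)) (f : List Int) :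
    f.foldl
      (fun (acc : Option (PySem.Dict Int (List Int) × PySem.Dict Int Bool × List Int)) v =>
        match acc with
        | none => none
        | some (T, vis, nxt) =>
          match adj.get? v with
          | none => none
          | some cs =>
            let p := freshChildrenB cs vis
            some (T.insert v p.1, p.2, nxt ++ p.1))
      none = none := by
  induction f with
  | nil => rfl
  | cons v t ih => simpa using ih

theorem level_acc (adj : PySem.Dict Int (List Int)) (f : List Int)
    (T : PySem.Dict Int (List Int)) (vis : PySem.Dict Int Bool) (nxt0 : List Int) :
    f.foldl
      (fun (acc : Option (PySem.Dict Int (List Int) × PySem.Dict Int Bool × List Int)) v =>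
        match acc with
        | none => none
        | some (T, vis, nxt) =>
          match adj.get? v with
          | none => none
          | some cs =>
            let p := freshChildrenB cs vis
            some (T.insert v p.1, p.2, nxt ++ p.1))
      (some (T, vis, nxt0))
    = (levelB adj f vis T).map (fun r => (r.1, r.2.1, nxt0 ++ r.2.2)) := by
  induction f generalizing T vis nxt0 with
  | nil => simp [levelB]
  | cons v t ih =>
    simp only [levelB, List.foldl_cons]
    cases hget : adj.get? v with
    | none => simp [level_none]
    | some cs =>
      simp only
      rw [ih, ih _ (freshChildrenB cs vis).2 ([] ++ (freshChildrenB cs vis).1)]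
      cases h : levelB adj t (freshChildrenB cs vis).2 (T.insert v (freshChildrenB cs vis).1) <;>
        simp

theorem level_cons (adj : PySem.Dict Int (List Int)) (f : List Int) (v : Int)
    (vis : PySem.Dict Int Bool) (T : PySem.Dict Int (List Int)) :
    levelB adj (v :: f) vis T
      = match adj.get? v with
        | none => none
        | some cs =>
          (levelB adj f (freshChildrenB cs vis).2
              (T.insert v (freshChildrenB cs vis).1)).map
            (fun r => (r.1, r.2.1, (freshChildrenB cs vis).1 ++ r.2.2)) := by
  cases hget : adj.get? v with
  | none => simp only [levelB, List.foldl_cons, hget]; exact level_none adj f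
  | some cs =>
    simp only [levelB, List.foldl_cons, hget]
    rw [show (([] : List Int) ++ (freshChildrenB cs vis).1) = (freshChildrenB cs vis).1 from
      List.nil_append _]
    exact level_acc adj f _ _ _

theorem level_isSome (adj : PySem.Dict Int (List Int)) (f : List Int)
    (vis : PySem.Dict Int Bool) (T : PySem.Dict Int (List Int))
    (hf : ∀ v ∈ f, (adj.get? v).isSome = true) :
    (levelB adj f vis T).isSome = true := by
  induction f generalizing vis T with
  | nil => simp [levelB]
  | cons v t ih =>
    have hv := hf v (List.mem_cons_self ..)
    cases hget : adj.get? v with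
    | none => rw [hget] at hv; simp at hv
    | some cs =>
      simp only [levelB, List.foldl_cons, hget]
      rw [level_acc]
      simp only [Option.isSome_map]
      exact ih _ _ (fun u hu => hf u (List.mem_cons_of_mem _ hu))

theorem loopA_level (adj : PySem.Dict Int (List Int)) (f : List Int) (m : Nat)
    (q : List Int) (vis : PySem.Dict Int Bool) (T : PySem.Dict Int (List Int))
    (T' : PySem.Dict Int (List Int)) (vis' : PySem.Dict Int Bool) (nxt : List Int)
    (h : levelB adj f vis T = some (T', vis', nxt)) :
    bfsLoopA adj (f.length + m) (f ++ q) vis T = bfsLoopA adj m (q ++ nxt) vis' T' := by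
  induction f generalizing q vis T T' vis' nxt m with
  | nil =>
    simp only [levelB, List.foldl_nil, Option.some.injEq, Prod.mk.injEq] at h
    obtain ⟨h1, h2, h3⟩ := h
    subst h1; subst h2; subst h3
    simp
  | cons v t ih =>
    rw [level_cons] at h
    cases hget : adj.get? v with
    | none => rw [hget] at h; simp at h
    | some cs =>
      rw [hget] at h
      obtain ⟨r, hr, hreq⟩ := Option.map_eq_some_iff.1 h
      obtain ⟨T2, vis2, nxt2⟩ := r
      simp only [Prod.mk.injEq] at hreq
      obtain ⟨e1, e2, e3⟩ := hreq
      subst e1; subst e2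
      have : (v :: t).length + m = ((t.length + m)) + 1 := by simp; omega
      rw [this]
      show bfsLoopA adj ((t.length + m) + 1) (v :: (t ++ q)) vis T = _
      simp only [bfsLoopA, hget]
      rw [childA cs v vis T (t ++ q) []]
      simp only [List.nil_append]
      have hq : (t ++ q) ++ (freshChildrenB cs vis).1 = t ++ (q ++ (freshChildrenB cs vis).1) :=
        List.append_assoc ..
      rw [hq, ih (m := m) (q := q ++ (freshChildrenB cs vis).1) (h := hr)]
      rw [← e3, List.append_assoc]

theorem countP_insert_mono (cs : List Int) (vis : PySem.Dict Int Bool) (c : Int) :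
    cs.countP (fun x => !((vis.insert c true).getD x false))
      ≤ cs.countP (fun x => !(vis.getD x false)) := by
  apply List.countP_mono_left
  intro x _ hx
  simp only [PySem.Dict.getD_insert] at hx
  by_cases h : x = c
  · simp [h] at hx
  · simpa [h] using hx

theorem countP_insert_strict (cs : List Int) (vis : PySem.Dict Int Bool) (c : Int)
    (hc : c ∈ cs) (hv : vis.getD c false = false) :
    cs.countP (fun x => !((vis.insert c true).getD x false)) + 1
      ≤ cs.countP (fun x => !(vis.getD x false)) := by
  induction cs with
  | nil => simp at hc
  | cons x t ih =>
    rw [List.countP_cons, List.countP_cons]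
    by_cases hx : x = c
    · subst hx
      have := countP_insert_mono t vis x
      simp only [PySem.Dict.getD_insert_self, hv, Bool.not_true, Bool.not_false,
        Bool.false_eq_true, if_false, if_true]
      omega
    · have hmemt : c ∈ t := by
        rcases List.mem_cons.1 hc with h | h
        · exact absurd h.symm hx
        · exact h
      have h1 := ih hmemt
      have hgd : (vis.insert c true).getD x false = vis.getD x false := by
        rw [PySem.Dict.getD_insert]; simp [hx]
      rw [hgd]
      split <;> omega

theorem mu_insert_mono (adj_list : List (Int × List Int)) (vis : PySem.Dict Int Bool)
    (c : Int) : muA adj_list (vis.insert c true) ≤ muA adj_list vis := by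
  induction adj_list with
  | nil => simp [muA]
  | cons p t ih =>
    simp only [muA, List.map_cons, List.sum_cons] at *
    exact Nat.add_le_add (countP_insert_mono p.2 vis c) ih

theorem mu_insert_strict (adj_list : List (Int × List Int)) (vis : PySem.Dict Int Bool)
    (c : Int) (p : Int × List Int) (hp : p ∈ adj_list) (hc : c ∈ p.2)
    (hv : vis.getD c false = false) :
    muA adj_list (vis.insert c true) + 1 ≤ muA adj_list vis := by
  induction adj_list with
  | nil => simp at hp
  | cons e t ih =>
    simp only [muA, List.map_cons, List.sum_cons] at *
    rcases List.mem_cons.1 hp with h | h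
    · subst h
      have h1 := countP_insert_strict p.2 vis c hc hv
      have h2 := mu_insert_mono t vis c
      simp only [muA] at h2
      omega
    · have h1 := countP_insert_mono e.2 vis c
      have h2 := ih h
      omega

theorem fc_mu (adj_list : List (Int × List Int)) (cs : List Int) (vis : PySem.Dict Int Bool)
    (hcs : ∀ x ∈ cs, ∃ p ∈ adj_list, x ∈ p.2) :
    muA adj_list (freshChildrenB cs vis).2 + (freshChildrenB cs vis).1.length
      ≤ muA adj_list vis := by
  induction cs generalizing vis with
  | nil => simp [freshChildrenB]
  | cons c t ih =>
    by_cases h : vis.getD c false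
    · have hfc : freshChildrenB (c :: t) vis = freshChildrenB t vis := by
        simp [freshChildrenB, h]
      rw [hfc]
      exact ih vis (fun x hx => hcs x (List.mem_cons_of_mem _ hx))
    · have hfc : (freshChildrenB (c :: t) vis)
          = ([c] ++ (freshChildrenB t (vis.insert c true)).1,
             (freshChildrenB t (vis.insert c true)).2) := by
        simp only [freshChildrenB, List.foldl_cons, h, Bool.false_eq_true, if_false]
        rw [show (([] : List Int) ++ [c], vis.insert c true)
            = (([c] : List Int), vis.insert c true) by simp]
        exact fc_acc t [c] (vis.insert c true)
      rw [hfc]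
      simp only [List.length_append, List.length_cons, List.length_nil]
      obtain ⟨p, hp, hcp⟩ := hcs c (List.mem_cons_self ..)
      have h1 := mu_insert_strict adj_list vis c p hp hcp (by simpa using h)
      have h2 := ih (vis.insert c true) (fun x hx => hcs x (List.mem_cons_of_mem _ hx))
      omega

theorem level_mu (adj_list : List (Int × List Int)) (f : List Int)
    (vis : PySem.Dict Int Bool) (T T' : PySem.Dict Int (List Int))
    (vis' : PySem.Dict Int Bool) (nxt : List Int)
    (h : levelB ⟨adj_list⟩ f vis T = some (T', vis', nxt)) :
    muA adj_list vis' + nxt.length ≤ muA adj_list vis := by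
  induction f generalizing vis T T' vis' nxt with
  | nil =>
    simp only [levelB, List.foldl_nil, Option.some.injEq, Prod.mk.injEq] at h
    obtain ⟨_, h2, h3⟩ := h
    subst h2; subst h3; simp
  | cons v t ih =>
    rw [level_cons] at h
    cases hget : PySem.Dict.get? ⟨adj_list⟩ v with
    | none => rw [hget] at h; simp at h
    | some cs =>
      rw [hget] at h
      obtain ⟨⟨T2, vis2, nxt2⟩, hr, hreq⟩ := Option.map_eq_some_iff.1 h
      simp only [Prod.mk.injEq] at hreq
      obtain ⟨e1, e2, e3⟩ := hreq
      subst e2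
      have hmem : (v, cs) ∈ adj_list := PySem.Dict.mem_items_of_get?_eq_some _ hget
      have h1 := fc_mu adj_list cs vis (fun x hx => ⟨(v, cs), hmem, hx⟩)
      have h2 := ih _ _ _ _ _ hr
      rw [← e3]
      simp only [List.length_append]
      omega

theorem level_mem (adj_list : List (Int × List Int)) (R : List Int) (f : List Int)
    (vis : PySem.Dict Int Bool) (T T' : PySem.Dict Int (List Int))
    (vis' : PySem.Dict Int Bool) (nxt : List Int)
    (hcl : ∀ v ∈ R, ∀ cs, (PySem.Dict.mk adj_list).get? v = some cs → ∀ c ∈ cs, c ∈ R)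
    (hfm : ∀ v ∈ f, v ∈ R)
    (h : levelB ⟨adj_list⟩ f vis T = some (T', vis', nxt)) :
    ∀ u ∈ nxt, u ∈ R := by
  induction f generalizing vis T T' vis' nxt with
  | nil =>
    simp only [levelB, List.foldl_nil, Option.some.injEq, Prod.mk.injEq] at h
    obtain ⟨_, _, h3⟩ := h
    subst h3; simp
  | cons v t ih =>
    rw [level_cons] at h
    cases hget : PySem.Dict.get? ⟨adj_list⟩ v with
    | none => rw [hget] at h; simp at h
    | some cs =>
      rw [hget] at h
      obtain ⟨⟨T2, vis2, nxt2⟩, hr, hreq⟩ := Option.map_eq_some_iff.1 h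
      simp only [Prod.mk.injEq] at hreq
      obtain ⟨e1, e2, e3⟩ := hreq
      subst e3
      intro u hu
      rcases List.mem_append.1 hu with h1 | h1
      · exact hcl v (hfm v (List.mem_cons_self ..)) cs hget u (fc_subset cs vis u h1)
      · exact ih _ _ _ _ _ (fun w hw => hfm w (List.mem_cons_of_mem _ hw)) hr u h1

theorem subset_pvStep (adj_list : List (Int × List Int)) (S : List Int) :
    S ⊆ pvStep adj_list S := by
  intro y hy
  exact (PySem.Set.mem_update ..).2 (Or.inl hy)

theorem root_mem_pvReach (adj_list : List (Int × List Int)) (root : Int) :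
    root ∈ pvReach adj_list root := by
  unfold pvReach
  generalize (root :: adj_list.flatMap (fun p => p.2)).length = n
  induction n with
  | zero => simp [PySem.Set.ofList]
  | succ k ih =>
    rw [Function.iterate_succ_apply']
    exact subset_pvStep adj_list _ ih

theorem pvStep_fix_closed (adj_list : List (Int × List Int)) (S : List Int)
    (hfix : pvStep adj_list S = S) :
    ∀ v ∈ S, ∀ cs, (PySem.Dict.mk adj_list).get? v = some cs → ∀ c ∈ cs, c ∈ S := by
  intro v hv cs hcs c hc
  have hmem : c ∈ S.flatMap (fun v => (((PySem.Dict.mk adj_list).get? v).getD [])) :=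
    List.mem_flatMap.2 ⟨v, hv, by rw [hcs]; exact hc⟩
  have : c ∈ pvStep adj_list S := (PySem.Set.mem_update ..).2 (Or.inr hmem)
  rwa [hfix] at this

theorem iter_nodup (adj_list : List (Int × List Int)) (root : Int) (n : Nat) :
    ((pvStep adj_list)^[n] (PySem.Set.ofList [root])).Nodup := by
  induction n with
  | zero => exact PySem.Set.nodup_ofList _
  | succ k ih =>
    rw [Function.iterate_succ_apply']
    exact PySem.Set.nodup_update _ _ ih

theorem iter_subset_univ (adj_list : List (Int × List Int)) (root : Int) (n : Nat) :
    ((pvStep adj_list)^[n] (PySem.Set.ofList [root]))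
      ⊆ root :: adj_list.flatMap (fun p => p.2) := by
  induction n with
  | zero => intro y hy; simp [PySem.Set.ofList] at hy; simp [hy]
  | succ k ih =>
    rw [Function.iterate_succ_apply']
    intro y hy
    rcases (PySem.Set.mem_update ..).1 hy with h | h
    · exact ih h
    · obtain ⟨v, hv, hy2⟩ := List.mem_flatMap.1 h
      cases hget : (PySem.Dict.mk adj_list).get? v with
      | none => rw [hget] at hy2; simp at hy2
      | some cs =>
        rw [hget] at hy2
        simp only [Option.getD_some] at hy2
        have hmem : (v, cs) ∈ adj_list := PySem.Dict.mem_items_of_get?_eq_some _ hget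
        exact List.mem_cons_of_mem _ (List.mem_flatMap.2 ⟨(v, cs), hmem, hy2⟩)

theorem nodup_subset_length (l u : List Int) (h : l.Nodup) (hs : l ⊆ u) :
    l.length ≤ u.length := by
  calc l.length = l.toFinset.card := (List.toFinset_card_of_nodup h).symm
  _ ≤ u.toFinset.card := Finset.card_le_card
      (by intro x hx; simp only [List.mem_toFinset] at *; exact hs hx)
  _ ≤ u.length := u.toFinset_card_le

theorem pvStep_grow (adj_list : List (Int × List Int)) (S : List Int)
    (hne : pvStep adj_list S ≠ S) : S.length + 1 ≤ (pvStep adj_list S).length := by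
  unfold pvStep at *
  rw [PySem.Set.update_eq_append_filter] at *
  rcases hfil : (PySem.Set.ofList
      (S.flatMap (fun v => (((PySem.Dict.mk adj_list).get? v).getD [])))).filter
      (fun y => !(PySem.Set.contains S y)) with _ | ⟨a, t⟩
  · rw [hfil] at hne; simp at hne
  · simp

theorem iter_grow (adj_list : List (Int × List Int)) (root : Int) (i : Nat)
    (h : ∀ j < i, pvStep adj_list ((pvStep adj_list)^[j] (PySem.Set.ofList [root]))
        ≠ (pvStep adj_list)^[j] (PySem.Set.ofList [root])) :
    i + 1 ≤ ((pvStep adj_list)^[i] (PySem.Set.ofList [root])).length := by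
  induction i with
  | zero => simp [PySem.Set.ofList]
  | succ k ih =>
    have h1 := ih (fun j hj => h j (Nat.lt_succ_of_lt hj))
    have h2 := pvStep_grow adj_list _ (h k (Nat.lt_succ_self k))
    rw [Function.iterate_succ_apply']
    omega

theorem pvReach_fix (adj_list : List (Int × List Int)) (root : Int) :
    pvStep adj_list (pvReach adj_list root) = pvReach adj_list root := by
  set N := (root :: adj_list.flatMap (fun p => p.2)).length with hN
  by_cases hfix : ∃ i ≤ N, pvStep adj_list ((pvStep adj_list)^[i] (PySem.Set.ofList [root]))
      = (pvStep adj_list)^[i] (PySem.Set.ofList [root])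
  · obtain ⟨i, hi, hf⟩ := hfix
    have hstable : ∀ j, (pvStep adj_list)^[j] ((pvStep adj_list)^[i] (PySem.Set.ofList [root]))
        = (pvStep adj_list)^[i] (PySem.Set.ofList [root]) :=
      fun j => Function.iterate_fixed hf j
    have hreach : pvReach adj_list root = (pvStep adj_list)^[i] (PySem.Set.ofList [root]) := by
      unfold pvReach
      rw [← hN, show N = (N - i) + i by omega, Function.iterate_add_apply]
      exact hstable (N - i)
    rw [hreach, hf]
  · push Not at hfix
    exfalso
    have hg := iter_grow adj_list root (N + 1)
      (fun j hj => hfix j (by omega))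
    have hle := nodup_subset_length _ _ (iter_nodup adj_list root (N + 1))
      (iter_subset_univ adj_list root (N + 1))
    rw [← hN] at hle
    omega

theorem pvReach_closed (adj_list : List (Int × List Int)) (root : Int) :
    ∀ v ∈ pvReach adj_list root, ∀ cs, (PySem.Dict.mk adj_list).get? v = some cs →
      ∀ c ∈ cs, c ∈ pvReach adj_list root :=
  pvStep_fix_closed adj_list _ (pvReach_fix adj_list root)


theorem main_loop (adj_list : List (Int × List Int)) (root : Int) (n : Nat) (f : List Int)
    (vis : PySem.Dict Int Bool) (T : PySem.Dict Int (List Int))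
    (hkeys : ∀ v ∈ pvReach adj_list root, ((PySem.Dict.mk adj_list).get? v).isSome = true)
    (hf : ∀ v ∈ f, v ∈ pvReach adj_list root)
    (hfuel : f.length + muA adj_list vis ≤ n) :
    bfsLoopA ⟨adj_list⟩ n f vis T = bfsLoopB ⟨adj_list⟩ n f vis T := by
  induction n using Nat.strong_induction_on generalizing f vis T with
  | _ n IH =>
  cases f with
  | nil => cases n <;> simp [bfsLoopA, bfsLoopB]
  | cons v t =>
    obtain ⟨m, rfl⟩ : ∃ m, n = m + 1 := by
      rcases n with _ | m
      · simp at hfuel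
      · exact ⟨m, rfl⟩
    have hsome := level_isSome ⟨adj_list⟩ (v :: t) vis T
      (fun u hu => hkeys u (hf u hu))
    obtain ⟨⟨T', vis', nxt⟩, hl⟩ := Option.isSome_iff_exists.1 hsome
    have hA : bfsLoopA ⟨adj_list⟩ (m + 1) (v :: t) vis T
        = bfsLoopA ⟨adj_list⟩ (m - t.length) nxt vis' T' := by
      have e1 : m + 1 = (v :: t).length + (m - t.length) := by
        simp only [List.length_cons] at hfuel ⊢; omega
      have h0 := loopA_level ⟨adj_list⟩ (v :: t) (m - t.length) [] vis T T' vis' nxt hl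
      simp only [List.append_nil, List.nil_append] at h0
      rw [← e1] at h0
      exact h0
    have hB : bfsLoopB ⟨adj_list⟩ (m + 1) (v :: t) vis T
        = bfsLoopB ⟨adj_list⟩ (m - t.length) nxt vis' T' := by
      simp only [bfsLoopB, hl]
    rw [hA, hB]
    apply IH (m - t.length) (by simp only [List.length_cons] at hfuel; omega)
    · exact level_mem adj_list _ _ _ _ _ _ _ (pvReach_closed adj_list root) hf hl
    · have h1 := level_mu adj_list _ _ _ _ _ _ hl
      simp only [List.length_cons] at hfuel
      omega

theorem mu_le_budget (adj_list : List (Int × List Int)) (vis : PySem.Dict Int Bool) :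
    muA adj_list vis ≤ (adj_list.map (fun p => p.2.length)).sum := by
  unfold muA
  induction adj_list with
  | nil => simp
  | cons p t ih =>
    simp only [List.map_cons, List.sum_cons]
    exact Nat.add_le_add List.countP_le_length ih

-- ===== VERDICT (by name: the statement is the Claim_ definition above) =====
theorem get_bfs_tree_spec : Claim_equal_get_bfs_tree := by
  intro adj_list root _hdom hpre
  unfold Spec_get_bfs_tree get_bfs_tree get_bfs_tree_alt
  apply congrArg PySem.Dict.items
  apply main_loop adj_list root _ _ _ _ hpre
  · intro v hv
    simp only [List.mem_singleton] at hv
    subst hv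
    exact root_mem_pvReach adj_list v
  · have := mu_le_budget adj_list (PySem.Dict.empty.insert root true)
    simp only [List.length_singleton]
    omega
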